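-- pv_equiv track=rewrite | github.com/pyta-uoft/pyta | examples/pylint/r1702_too_many_nested_blocks.py | cross_join
-- ===== SOURCE A (Python) =====
-- from typing import Optional
--
-- def cross_join(x_list: list[Optional[int]], y_list: list[Optional[int]],
--                z_list: list[Optional[int]]) -> list[tuple[int, int, int]]:
--     """Perform an all-by-all join of all elements in the input lists.
--
--     Note: This function skips elements which are None.
--     """
--     cross_join_list = []
--     for x in x_list:  # Error on this line: "Too many nested blocks"
--         if x is not None:
--             for y in y_list:
--                 if y is not None:
--                     for z in z_list:
--                         if z is not None:
--                             cross_join_list.append((x, y, z))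
--     return cross_join_list
-- ===== SOURCE B (Python) =====
-- def cross_join(x_list, y_list, z_list):
--     """All-by-all join of non-None elements, by index arithmetic over a single
--     flat range: clean each list, then decode each flat index k with divmod."""
--     xs = [x for x in x_list if x is not None]
--     ys = [y for y in y_list if y is not None]
--     zs = [z for z in z_list if z is not None]
--     ny, nz = len(ys), len(zs)
--     out = []
--     for k in range(len(xs) * ny * nz):
--         q, l = divmod(k, nz)
--         i, j = divmod(q, ny)
--         out.append((xs[i], ys[j], zs[l]))
--     return out
-- ===== Notes on version B (the rewrite author's own statement) =====
-- stated objective: alternative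
-- what changed: Instead of three nested loops with interleaved None-guards, B cleans each list once and then enumerates a single flat index range of size |xs|*|ys|*|zs|, decoding each index into a triple of positions with divmod (mixed-radix decoding).
import Mathlib
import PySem

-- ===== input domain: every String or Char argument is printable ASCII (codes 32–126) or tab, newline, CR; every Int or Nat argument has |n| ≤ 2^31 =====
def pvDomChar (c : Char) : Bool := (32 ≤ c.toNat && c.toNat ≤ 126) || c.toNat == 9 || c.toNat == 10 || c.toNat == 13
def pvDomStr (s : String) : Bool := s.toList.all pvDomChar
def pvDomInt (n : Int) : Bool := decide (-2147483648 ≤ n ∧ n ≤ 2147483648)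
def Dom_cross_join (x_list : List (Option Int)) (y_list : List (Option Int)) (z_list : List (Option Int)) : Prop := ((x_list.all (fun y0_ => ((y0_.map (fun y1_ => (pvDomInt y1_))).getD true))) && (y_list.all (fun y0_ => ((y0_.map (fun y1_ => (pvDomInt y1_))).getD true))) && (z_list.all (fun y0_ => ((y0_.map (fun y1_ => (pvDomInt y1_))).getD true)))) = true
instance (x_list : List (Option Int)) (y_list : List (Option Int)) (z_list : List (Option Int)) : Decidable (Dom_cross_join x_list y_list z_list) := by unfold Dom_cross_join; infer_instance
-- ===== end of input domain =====

-- B replaces the three nested None-guarded loops by cleaning each list once and then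
-- decoding a single flat index range with divmod (mixed-radix enumeration); same values, no speed claim.

-- ===== PORT A =====
def cross_join (x_list : List (Option Int)) (y_list : List (Option Int)) (z_list : List (Option Int)) : List (Int × Int × Int) :=
  x_list.foldl (fun acc xo =>
    match xo with
    | none => acc
    | some x =>
      y_list.foldl (fun acc yo =>
        match yo with
        | none => acc
        | some y =>
          z_list.foldl (fun acc zo =>
            match zo with
            | none => acc
            | some z => acc ++ [(x, y, z)]) acc) acc) []

-- ===== PORT B =====
-- the list indices i, j, l produced by divmod are always in range, so Python's xs[i]
-- agrees with getD; divmod of nonnegative ints is Nat division/modulo.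
def cross_join_alt (x_list : List (Option Int)) (y_list : List (Option Int)) (z_list : List (Option Int)) : List (Int × Int × Int) :=
  let xs := x_list.filterMap id
  let ys := y_list.filterMap id
  let zs := z_list.filterMap id
  let ny := ys.length
  let nz := zs.length
  (List.range (xs.length * ny * nz)).foldl (fun out k =>
    let q := k / nz
    let l := k % nz
    let i := q / ny
    let j := q % ny
    out ++ [(xs.getD i 0, ys.getD j 0, zs.getD l 0)]) []

-- ===== PRECONDITION & SPEC =====
def Spec_cross_join (x_list : List (Option Int)) (y_list : List (Option Int)) (z_list : List (Option Int)) (out : List (Int × Int × Int)) : Prop := out = cross_join_alt x_list y_list z_list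
instance (x_list : List (Option Int)) (y_list : List (Option Int)) (z_list : List (Option Int)) (out : List (Int × Int × Int)) : Decidable (Spec_cross_join x_list y_list z_list out) := by unfold Spec_cross_join; infer_instance

-- ===== CLAIM (what is proved, stated in full; the proofs are below) =====
def Claim_equal_cross_join : Prop := ∀ (x_list : List (Option Int)) (y_list : List (Option Int)) (z_list : List (Option Int)), Dom_cross_join x_list y_list z_list → Spec_cross_join x_list y_list z_list (cross_join x_list y_list z_list)

-- ===== LEMMAS AND PROOFS =====

-- append-accumulating foldl is a map
theorem foldl_app_map {α β : Type} (l : List α) (f : α → β) (acc : List β) :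
    l.foldl (fun out k => out ++ [f k]) acc = acc ++ l.map f := by
  induction l generalizing acc with
  | nil => simp
  | cons h t ih => simp [ih]

-- flat index range of size a*m, decoded with /m and %m, is the two-level enumeration
theorem range_mul_flatMap {β : Type} (a m : Nat) (G : Nat → Nat → List β) :
    (List.range (a * m)).flatMap (fun k => G (k / m) (k % m))
      = (List.range a).flatMap (fun i => (List.range m).flatMap (fun j => G i j)) := by
  by_cases hm : m = 0
  · subst hm; simp
  · induction a with
    | zero => simp
    | succ a ih =>
      rw [Nat.succ_mul, List.range_add, List.flatMap_append, ih, List.flatMap_map]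
      rw [List.range_succ, List.flatMap_append]
      congr 1
      simp only [List.flatMap_singleton]
      apply List.flatMap_congr
      intro j hj
      have hjm : j < m := List.mem_range.mp hj
      have h1 : (a * m + j) / m = a := by
        rw [Nat.mul_comm a m, Nat.mul_add_div (Nat.pos_of_ne_zero hm)]
        simp [Nat.div_eq_of_lt hjm]
      have h2 : (a * m + j) % m = j := by
        rw [Nat.add_comm, Nat.add_mul_mod_self_right]
        exact Nat.mod_eq_of_lt hjm
      rw [h1, h2]

-- enumerating a list by indices through getD is the list itself
theorem map_range_getD {α : Type} [Inhabited α] (l : List α) (d : α) :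
    (List.range l.length).map (fun i => l.getD i d) = l := by
  apply List.ext_getElem
  · simp
  · intro i h1 h2
    simp [List.getD_eq_getElem?_getD, List.getElem?_eq_getElem h2]

theorem flatMap_range_getD {α β : Type} [Inhabited α] (l : List α) (d : α) (K : α → List β) :
    (List.range l.length).flatMap (fun i => K (l.getD i d)) = l.flatMap K := by
  conv_rhs => rw [← map_range_getD l d]
  rw [List.flatMap_map]

-- B computes the triple flatMap over the cleaned lists
theorem alt_eq (x_list y_list z_list : List (Option Int)) :
    cross_join_alt x_list y_list z_list
      = (x_list.filterMap id).flatMap (fun x =>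
          (y_list.filterMap id).flatMap (fun y =>
            (z_list.filterMap id).map (fun z => (x, y, z)))) := by
  unfold cross_join_alt
  rw [foldl_app_map]
  simp only [List.nil_append]
  rw [List.map_eq_flatMap]
  rw [range_mul_flatMap _ _
    (fun q l => [((x_list.filterMap id).getD (q / (y_list.filterMap id).length) 0,
                  (y_list.filterMap id).getD (q % (y_list.filterMap id).length) 0,
                  (z_list.filterMap id).getD l 0)])]
  rw [range_mul_flatMap _ _
    (fun i j => (List.range (z_list.filterMap id).length).flatMap
      (fun l => [((x_list.filterMap id).getD i 0,
                  (y_list.filterMap id).getD j 0,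
                  (z_list.filterMap id).getD l 0)]))]
  rw [← flatMap_range_getD (x_list.filterMap id) 0
    (fun x => (y_list.filterMap id).flatMap (fun y =>
      (z_list.filterMap id).map (fun z => (x, y, z))))]
  apply List.flatMap_congr
  intro i _
  rw [← flatMap_range_getD (y_list.filterMap id) 0
    (fun y => (z_list.filterMap id).map
      (fun z => ((x_list.filterMap id).getD i 0, y, z)))]
  apply List.flatMap_congr
  intro j _
  rw [← List.map_eq_flatMap]
  conv_rhs => rw [← map_range_getD (z_list.filterMap id) 0, List.map_map]
  rfl

-- inner z-loop of A accumulates exactly the mapped filtered zs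
theorem zloop_eq (x y : Int) (zs : List (Option Int)) (acc : List (Int × Int × Int)) :
    zs.foldl (fun acc zo => match zo with
      | none => acc
      | some z => acc ++ [(x, y, z)]) acc
    = acc ++ (zs.filterMap id).map (fun z => (x, y, z)) := by
  induction zs generalizing acc with
  | nil => simp
  | cons h t ih => cases h <;> simp [ih]

-- middle y-loop of A accumulates the flatMap over filtered ys
theorem yloop_eq (x : Int) (ys zs : List (Option Int)) (acc : List (Int × Int × Int)) :
    ys.foldl (fun acc yo => match yo with
      | none => acc
      | some y =>
        zs.foldl (fun acc zo => match zo with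
          | none => acc
          | some z => acc ++ [(x, y, z)]) acc) acc
    = acc ++ (ys.filterMap id).flatMap (fun y => (zs.filterMap id).map (fun z => (x, y, z))) := by
  induction ys generalizing acc with
  | nil => simp
  | cons h t ih =>
    cases h with
    | none => simpa using ih acc
    | some y => simp only [List.foldl_cons]; rw [zloop_eq, ih]; simp

-- outer x-loop of A accumulates the full triple flatMap
theorem xloop_eq (xs ys zs : List (Option Int)) (acc : List (Int × Int × Int)) :
    xs.foldl (fun acc xo => match xo with
      | none => acc
      | some x =>
        ys.foldl (fun acc yo => match yo with
          | none => acc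
          | some y =>
            zs.foldl (fun acc zo => match zo with
              | none => acc
              | some z => acc ++ [(x, y, z)]) acc) acc) acc
    = acc ++ (xs.filterMap id).flatMap (fun x => (ys.filterMap id).flatMap (fun y => (zs.filterMap id).map (fun z => (x, y, z)))) := by
  induction xs generalizing acc with
  | nil => simp
  | cons h t ih =>
    cases h with
    | none => simpa using ih acc
    | some x => simp only [List.foldl_cons]; rw [yloop_eq, ih]; simp

-- ===== VERDICT (by name: the statement is the Claim_ definition above) =====
theorem cross_join_spec : Claim_equal_cross_join := by
  intro x_list y_list z_list _
  unfold Spec_cross_join cross_join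
  rw [alt_eq]
  simpa using xloop_eq x_list y_list z_list []
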